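-- pv_equiv track=rewrite | github.com/localgaji/CodingTestProgrammers | 레벨1/모의고사.py | solution
-- ===== SOURCE A (Python) =====
-- def solution(answers):
--     one = [1, 2, 3, 4, 5]
--     two = [2, 1, 2, 3, 2, 4, 2, 5]
--     three = [3, 3, 1, 1, 2, 2, 4, 4, 5, 5]
--
--     onecount, twocount, threecount = 0, 0, 0
--     for i in range (0,len(answers)) :
--         rest1, rest2, rest3 = i % 5, i % 8, i % 10
--         if answers[i] == one[rest1]:
--             onecount += 1
--         if answers[i] == two[rest2]:
--             twocount += 1
--         if answers[i] == three[rest3]: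
--             threecount += 1
--
--     score = [onecount, twocount, threecount]
--     answer = []
--
--     for i in range (1,4):
--         if score[i-1] == max(score):
--             answer += [i]
--
--     return answer
-- ===== SOURCE B (Python) =====
-- def solution(answers):
--     patterns = [[1, 2, 3, 4, 5],
--                 [2, 1, 2, 3, 2, 4, 2, 5],
--                 [3, 3, 1, 1, 2, 2, 4, 4, 5, 5]]
--     # One pass builds a histogram keyed by (position mod 40, answer); 40 is the common
--     # period of all three patterns, so each pattern's score is then read off the
--     # histogram over a fixed 40-slot table, without scanning the answers again.
--     cnt = {}
--     for i, a in enumerate(answers):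
--         key = (i % 40, a)
--         cnt[key] = cnt.get(key, 0) + 1
--     scores = [sum(cnt.get((j, p[j % len(p)]), 0) for j in range(40)) for p in patterns]
--     best = max(scores)
--     return [k + 1 for k, s in enumerate(scores) if s == best]
-- ===== Notes on version B (the rewrite author's own statement) =====
-- stated objective: alternative
-- what changed: A matches every answer against all three patterns in one interleaved modular-index loop; B instead builds a histogram of (position mod 40, answer) pairs in a single pass (40 = common period of the patterns) and then computes each score by looking up a fixed 40-slot table in the histogram, never rescanning the answers.
import Mathlib
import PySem

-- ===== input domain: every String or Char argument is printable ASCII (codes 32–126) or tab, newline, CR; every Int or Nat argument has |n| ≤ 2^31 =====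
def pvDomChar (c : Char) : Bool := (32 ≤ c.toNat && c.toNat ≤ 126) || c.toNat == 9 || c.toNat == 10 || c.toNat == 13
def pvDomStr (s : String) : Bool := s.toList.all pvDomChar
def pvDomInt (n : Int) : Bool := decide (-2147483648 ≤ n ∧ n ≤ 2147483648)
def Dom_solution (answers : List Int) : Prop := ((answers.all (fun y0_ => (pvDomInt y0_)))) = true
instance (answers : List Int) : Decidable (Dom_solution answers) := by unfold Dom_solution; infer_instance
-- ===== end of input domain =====

-- B replaces A's interleaved modular-index matching loop by a one-pass histogram of
-- (position mod 40, answer) pairs (40 = common period of the three patterns), from which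
-- each score is read off a fixed 40-slot lookup table (objective: alternative).

-- ===== PORT A =====
-- literal transliteration of A: one loop over range(0, len(answers)) keeping three counters,
-- then a loop over range(1, 4) collecting indices whose score equals max(score)
def solution (answers : List Int) : List Int :=
  let one : List Int := [1, 2, 3, 4, 5]
  let two : List Int := [2, 1, 2, 3, 2, 4, 2, 5]
  let three : List Int := [3, 3, 1, 1, 2, 2, 4, 4, 5, 5]
  let st :=
    (PySem.List.pyRange 0 (answers.length : Int) 1).foldl
      (fun (c : Int × Int × Int) i =>
        let rest1 := PySem.Int.mod i 5
        let rest2 := PySem.Int.mod i 8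
        let rest3 := PySem.Int.mod i 10
        let c1 := if PySem.List.pyGetD answers i 0 = PySem.List.pyGetD one rest1 0 then c.1 + 1 else c.1
        let c2 := if PySem.List.pyGetD answers i 0 = PySem.List.pyGetD two rest2 0 then c.2.1 + 1 else c.2.1
        let c3 := if PySem.List.pyGetD answers i 0 = PySem.List.pyGetD three rest3 0 then c.2.2 + 1 else c.2.2
        (c1, c2, c3))
      (0, 0, 0)
  let score : List Int := [st.1, st.2.1, st.2.2]
  (PySem.List.pyRange 1 4 1).foldl
    (fun answer i =>
      if PySem.List.pyGetD score (i - 1) 0 = (PySem.List.max? score (fun y => y)).getD 0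
      then answer ++ [i] else answer)
    ([] : List Int)

-- ===== PORT B =====
-- transliteration of Source B: one fold over enumerate(answers) builds the dict
-- cnt[(i % 40, a)] += 1, then each score is a 40-term sum of histogram lookups
def solution_alt (answers : List Int) : List Int :=
  let patterns : List (List Int) :=
    [[1, 2, 3, 4, 5], [2, 1, 2, 3, 2, 4, 2, 5], [3, 3, 1, 1, 2, 2, 4, 4, 5, 5]]
  let cnt : PySem.Dict (Int × Int) Int :=
    (PySem.List.enumerate answers 0).foldl
      (fun d p =>
        d.insert (PySem.Int.mod p.1 40, p.2) (d.getD (PySem.Int.mod p.1 40, p.2) 0 + 1))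
      PySem.Dict.empty
  let scores : List Int := patterns.map (fun p =>
    ((PySem.List.pyRange 0 40 1).map (fun j =>
      cnt.getD (j, PySem.List.pyGetD p (PySem.Int.mod j (p.length : Int)) 0) 0)).sum)
  let best := (PySem.List.max? scores (fun y => y)).getD 0
  ((PySem.List.enumerate scores 0).filter (fun is => is.2 = best)).map (fun is => is.1 + 1)

-- ===== PRECONDITION & SPEC =====
def Spec_solution (answers : List Int) (out : List Int) : Prop := out = solution_alt answers
instance (answers : List Int) (out : List Int) : Decidable (Spec_solution answers out) := by unfold Spec_solution; infer_instance

-- ===== CLAIM (what is proved, stated in full; the proofs are below) =====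
def Claim_equal_solution : Prop := ∀ (answers : List Int), Dom_solution answers → Spec_solution answers (solution answers)

-- ===== LEMMAS AND PROOFS =====

-- reference count: matches against pat cycled from absolute position j
def idxCnt (pat : List Int) : Nat → List Int → Int
  | _, [] => 0
  | j, a :: rest => (if a = pat.getD (j % pat.length) 0 then 1 else 0) + idxCnt pat (j + 1) rest

theorem idxCnt_append (pat : List Int) (l : List Int) (x : Int) (j : Nat) :
    idxCnt pat j (l ++ [x]) =
      idxCnt pat j l + (if x = pat.getD ((j + l.length) % pat.length) 0 then 1 else 0) := by
  induction l generalizing j with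
  | nil => simp [idxCnt]
  | cons a rest ih =>
      simp only [List.cons_append, idxCnt, ih, List.length_cons]
      have : j + 1 + rest.length = j + (rest.length + 1) := by omega
      rw [this]; ring_nf

-- the histogram loop of B, characterised as a count over the mapped key list
theorem cnt_getD (answers : List Int) (k : Int × Int) :
    ((PySem.List.enumerate answers 0).foldl
      (fun (d : PySem.Dict (Int × Int) Int) p =>
        d.insert (PySem.Int.mod p.1 40, p.2) (d.getD (PySem.Int.mod p.1 40, p.2) 0 + 1))
      PySem.Dict.empty).getD k 0
    = (((PySem.List.enumerate answers 0).map (fun p => (PySem.Int.mod p.1 40, p.2))).count k : Int) := by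
  have h :
      ((PySem.List.enumerate answers 0).map (fun p => (PySem.Int.mod p.1 40, p.2))).foldl
        (fun (d : PySem.Dict (Int × Int) Int) q => d.insert q (d.getD q 0 + 1)) PySem.Dict.empty
      = (PySem.List.enumerate answers 0).foldl
        (fun (d : PySem.Dict (Int × Int) Int) p =>
          d.insert (PySem.Int.mod p.1 40, p.2) (d.getD (PySem.Int.mod p.1 40, p.2) 0 + 1))
        PySem.Dict.empty := List.foldl_map
  rw [← h, PySem.Dict.getD_foldl_insert_add_one, PySem.Dict.getD_empty, zero_add]

-- sum of a pointwise sum splits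
theorem sum_map_add (l : List Int) (f g : Int → Int) :
    (l.map (fun j => f j + g j)).sum = (l.map f).sum + (l.map g).sum := by
  induction l with
  | nil => simp
  | cons a l ih => simp [ih]; ring

-- a sum of pair-equality indicators over a duplicate-free index list
theorem ind_sum (l : List Int) (g : Int → Int) (r x : Int) (hnd : l.Nodup) :
    (l.map (fun j => if (j, g j) = (r, x) then (1 : Int) else 0)).sum
      = if r ∈ l ∧ x = g r then 1 else 0 := by
  induction l with
  | nil => simp
  | cons a l ih =>
      rcases List.nodup_cons.mp hnd with ⟨ha, hl⟩
      rw [List.map_cons, List.sum_cons, ih hl]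
      by_cases h : a = r
      · subst h
        have hnotl : ¬ (a ∈ l ∧ x = g a) := fun hc => ha hc.1
        rw [if_neg hnotl, add_zero]
        by_cases hx : x = g a
        · rw [if_pos (by rw [hx]), if_pos ⟨List.mem_cons_self, hx⟩]
        · rw [if_neg (by simp only [Prod.mk.injEq, true_and]; exact fun hg => hx hg.symm),
            if_neg (fun hc => hx hc.2)]
      · rw [if_neg (by simp [Prod.mk.injEq, h]), zero_add]
        have hra : r ≠ a := fun h' => h h'.symm
        by_cases hm : r ∈ l <;> simp [hm, hra, List.mem_cons]

-- appending one element bumps exactly its own count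
theorem count_snoc (M : List (Int × Int)) (k e : Int × Int) :
    (((M ++ [e]).count k : Nat) : Int) = (M.count k : Int) + (if k = e then (1 : Int) else 0) := by
  rw [List.count_append]
  push_cast
  congr 1
  rw [List.count_cons, List.count_nil]
  by_cases h : k = e
  · simp [h]
  · simp only [h, if_false, beq_iff_eq]
    rw [if_neg (fun h' : e = k => h h'.symm)]
    simp

-- one B-score, for any pattern whose length divides 40, equals the reference count
set_option maxHeartbeats 1000000 in
theorem score_eq (pat : List Int) (hpos : 0 < pat.length) (hdvd : (pat.length : Int) ∣ 40)
    (answers : List Int) :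
    ((PySem.List.pyRange 0 40 1).map (fun j =>
      ((((PySem.List.enumerate answers 0).map (fun p => (PySem.Int.mod p.1 40, p.2))).count
        (j, PySem.List.pyGetD pat (PySem.Int.mod j (pat.length : Int)) 0) : Nat) : Int))).sum
    = idxCnt pat 0 answers := by
  induction answers using List.reverseRecOn with
  | nil => simp [PySem.List.enumerate, idxCnt]
  | append_singleton xs x ih =>
      have hM : (PySem.List.enumerate (xs ++ [x]) 0).map (fun p => (PySem.Int.mod p.1 40, p.2))
          = (PySem.List.enumerate xs 0).map (fun p => (PySem.Int.mod p.1 40, p.2))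
            ++ [(PySem.Int.mod (xs.length : Int) 40, x)] := by
        rw [PySem.List.enumerate_append]
        simp [PySem.List.enumerate]
      rw [hM]
      set r : Int := PySem.Int.mod (xs.length : Int) 40 with hr
      have hr40 : r = ((xs.length % 40 : Nat) : Int) := by
        rw [hr, PySem.Int.mod_eq_emod_of_pos (by norm_num)]; omega
      have hsplit : ∀ j : Int,
          ((((PySem.List.enumerate xs 0).map (fun p => (PySem.Int.mod p.1 40, p.2))
              ++ [(r, x)]).count
            (j, PySem.List.pyGetD pat (PySem.Int.mod j (pat.length : Int)) 0) : Nat) : Int)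
          = (((PySem.List.enumerate xs 0).map (fun p => (PySem.Int.mod p.1 40, p.2))).count
              (j, PySem.List.pyGetD pat (PySem.Int.mod j (pat.length : Int)) 0) : Int)
            + (if (j, PySem.List.pyGetD pat (PySem.Int.mod j (pat.length : Int)) 0) = (r, x)
               then (1 : Int) else 0) := by
        intro j
        exact count_snoc _ _ _
      simp only [hsplit]
      rw [sum_map_add, ih,
        ind_sum (PySem.List.pyRange 0 40 1)
          (fun j => PySem.List.pyGetD pat (PySem.Int.mod j (pat.length : Int)) 0) r x
          (by decide)]
      have hmem : r ∈ PySem.List.pyRange 0 40 1 := by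
        rw [PySem.List.mem_pyRange_one, hr40]
        have h40 : xs.length % 40 < 40 := Nat.mod_lt _ (by norm_num)
        omega
      have hg : PySem.List.pyGetD pat (PySem.Int.mod r (pat.length : Int)) 0
          = pat.getD ((0 + xs.length) % pat.length) 0 := by
        have h1 : PySem.Int.mod r (pat.length : Int) = ((xs.length % pat.length : Nat) : Int) := by
          rw [hr, PySem.Int.mod_eq_emod_of_pos (by exact_mod_cast hpos),
            PySem.Int.mod_eq_emod_of_pos (by norm_num),
            Int.emod_emod_of_dvd _ hdvd]
          omega
        rw [h1, PySem.List.pyGetD_natCast, Nat.zero_add]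
      rw [hg, idxCnt_append]
      simp [hmem]

theorem select_eq (c1 c2 c3 : Int) :
    (PySem.List.pyRange 1 4 1).foldl
      (fun (answer : List Int) i =>
        if PySem.List.pyGetD [c1, c2, c3] (i - 1) 0 = (PySem.List.max? [c1, c2, c3] (fun y => y)).getD 0
        then answer ++ [i] else answer) ([] : List Int)
    = ((PySem.List.enumerate [c1, c2, c3] 0).filter
        (fun is => is.2 = (PySem.List.max? [c1, c2, c3] (fun y => y)).getD 0)).map (fun is => is.1 + 1) := by
  have hr : PySem.List.pyRange 1 4 1 = [1, 2, 3] := by decide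
  rw [hr]
  generalize (PySem.List.max? [c1, c2, c3] (fun y => y)).getD 0 = m
  simp [PySem.List.enumerate, PySem.List.pyGetD, List.filter, List.foldl]
  split_ifs <;> simp_all

theorem Aloop (answers : List Int) :
    (PySem.List.pyRange 0 (answers.length : Int) 1).foldl
      (fun (c : Int × Int × Int) i =>
        ((if PySem.List.pyGetD answers i 0 = PySem.List.pyGetD [1,2,3,4,5] (PySem.Int.mod i 5) 0 then c.1 + 1 else c.1),
         (if PySem.List.pyGetD answers i 0 = PySem.List.pyGetD [2,1,2,3,2,4,2,5] (PySem.Int.mod i 8) 0 then c.2.1 + 1 else c.2.1),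
         (if PySem.List.pyGetD answers i 0 = PySem.List.pyGetD [3,3,1,1,2,2,4,4,5,5] (PySem.Int.mod i 10) 0 then c.2.2 + 1 else c.2.2)))
      ((0 : Int), (0 : Int), (0 : Int))
    = (idxCnt [1,2,3,4,5] 0 answers, idxCnt [2,1,2,3,2,4,2,5] 0 answers, idxCnt [3,3,1,1,2,2,4,4,5,5] 0 answers) := by
  induction answers using List.reverseRecOn with
  | nil => decide
  | append_singleton xs x ih =>
      rw [List.length_append]
      have hcast : ((xs.length + [x].length : Nat) : Int) = (xs.length : Int) + 1 := by
        simp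
      rw [hcast, PySem.List.pyRange_one_succ_right (by positivity)]
      rw [List.foldl_append]
      have hcongr : (PySem.List.pyRange 0 (xs.length : Int) 1).foldl
          (fun (c : Int × Int × Int) i =>
            ((if PySem.List.pyGetD (xs ++ [x]) i 0 = PySem.List.pyGetD [1,2,3,4,5] (PySem.Int.mod i 5) 0 then c.1 + 1 else c.1),
             (if PySem.List.pyGetD (xs ++ [x]) i 0 = PySem.List.pyGetD [2,1,2,3,2,4,2,5] (PySem.Int.mod i 8) 0 then c.2.1 + 1 else c.2.1),
             (if PySem.List.pyGetD (xs ++ [x]) i 0 = PySem.List.pyGetD [3,3,1,1,2,2,4,4,5,5] (PySem.Int.mod i 10) 0 then c.2.2 + 1 else c.2.2)))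
          ((0 : Int), (0 : Int), (0 : Int))
          = (PySem.List.pyRange 0 (xs.length : Int) 1).foldl
          (fun (c : Int × Int × Int) i =>
            ((if PySem.List.pyGetD xs i 0 = PySem.List.pyGetD [1,2,3,4,5] (PySem.Int.mod i 5) 0 then c.1 + 1 else c.1),
             (if PySem.List.pyGetD xs i 0 = PySem.List.pyGetD [2,1,2,3,2,4,2,5] (PySem.Int.mod i 8) 0 then c.2.1 + 1 else c.2.1),
             (if PySem.List.pyGetD xs i 0 = PySem.List.pyGetD [3,3,1,1,2,2,4,4,5,5] (PySem.Int.mod i 10) 0 then c.2.2 + 1 else c.2.2)))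
          ((0 : Int), (0 : Int), (0 : Int)) := by
        apply PySem.List.foldl_congr_mem
        intro acc i hi
        rw [PySem.List.mem_pyRange_one] at hi
        have : PySem.List.pyGetD (xs ++ [x]) i 0 = PySem.List.pyGetD xs i 0 := by
          obtain ⟨h0, h1⟩ := hi
          lift i to Nat using h0 with k
          rw [PySem.List.pyGetD_natCast, PySem.List.pyGetD_natCast,
            List.getD_append _ _ _ _ (by exact_mod_cast h1)]
        rw [this]
      rw [hcongr, ih]
      have hx : PySem.List.pyGetD (xs ++ [x]) (xs.length : Int) 0 = x := by
        rw [PySem.List.pyGetD_natCast]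
        simp [List.getD_eq_getElem?_getD]
      simp only [List.foldl_cons, List.foldl_nil]
      have e5 : PySem.Int.mod ((xs.length : Int)) 5 = ((xs.length % 5 : Nat) : Int) := by
        rw [PySem.Int.mod_eq_emod_of_pos (by norm_num)]; omega
      have e8 : PySem.Int.mod ((xs.length : Int)) 8 = ((xs.length % 8 : Nat) : Int) := by
        rw [PySem.Int.mod_eq_emod_of_pos (by norm_num)]; omega
      have e10 : PySem.Int.mod ((xs.length : Int)) 10 = ((xs.length % 10 : Nat) : Int) := by
        rw [PySem.Int.mod_eq_emod_of_pos (by norm_num)]; omega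
      rw [idxCnt_append, idxCnt_append, idxCnt_append]
      simp only [hx, e5, e8, e10, PySem.List.pyGetD_natCast, zero_add, List.length_cons,
        List.length_nil]
      split_ifs <;> simp [add_comm]

-- ===== VERDICT (by name: the statement is the Claim_ definition above) =====
theorem solution_spec : Claim_equal_solution := by
  intro answers _
  unfold Spec_solution solution solution_alt
  simp only [Aloop, List.map_cons, List.map_nil, cnt_getD]
  rw [score_eq [1,2,3,4,5] (by decide) (by decide) answers,
    score_eq [2,1,2,3,2,4,2,5] (by decide) (by decide) answers,
    score_eq [3,3,1,1,2,2,4,4,5,5] (by decide) (by decide) answers]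
  exact select_eq _ _ _
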